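-- pv_equiv track=rewrite | github.com/vitorpavinato/dmel_data | create_sfss/mutational_context_utils.py | find_consecutive_positions
-- ===== SOURCE A (Python) =====
-- def find_consecutive_positions(positions: list[int]) -> list[bool]:
--     """
--     This function find blocks of consecutive SNPs and
--     returns False if a SNPs is part of a block of SNPs
--     and True otherwise. This is useful to find and remove
--     positions that might make ambiguous mutational
--     contexts. Because of the nature of each of mutational
--     context were defined based on the reference and
--     alternative alleles.
--     """
--     pos = positions
--
--     # Initialize a list to store consecutive blocks
--     consecutive_blocks = []
--
--     # Initialize variables for the current block
--     current_block = [pos[0]]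
--
--     # Iterate through the positions starting from the second element
--     for i in range(1, len(pos)):
--         # Check if the current position is consecutive to the previous one
--         if pos[i] - pos[i - 1] == 1:
--             current_block.append(pos[i])
--         else:
--             # If not consecutive, start a new block
--             consecutive_blocks.append(current_block)
--             current_block = [pos[i]]
--
--     # Append the last block
--     consecutive_blocks.append(current_block)
--
--     positions_to_keep = []
--     for block in consecutive_blocks:
--         if len(block) == 1:
--             positions_to_keep.append(True)
--         else:
--             for i in block:
--                 positions_to_keep.append(False)
--
--     return positions_to_keep
-- ===== SOURCE B (Python) =====
-- def find_consecutive_positions(positions: list[int]) -> list[bool]: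
--     """Single pass: a position is True iff it is adjacent neither to its
--     predecessor nor to its successor; no block lists are built."""
--     n = len(positions)
--     return [(i == 0 or positions[i] - positions[i - 1] != 1)
--             and (i == n - 1 or positions[i + 1] - positions[i] != 1)
--             for i in range(n)]
-- ===== Notes on version B (the rewrite author's own statement) =====
-- stated objective: simpler
-- what changed: Instead of grouping positions into consecutive blocks and then rendering each block, B decides each position independently in one comprehension from its two neighbors (True iff adjacent to neither).
import Mathlib
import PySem

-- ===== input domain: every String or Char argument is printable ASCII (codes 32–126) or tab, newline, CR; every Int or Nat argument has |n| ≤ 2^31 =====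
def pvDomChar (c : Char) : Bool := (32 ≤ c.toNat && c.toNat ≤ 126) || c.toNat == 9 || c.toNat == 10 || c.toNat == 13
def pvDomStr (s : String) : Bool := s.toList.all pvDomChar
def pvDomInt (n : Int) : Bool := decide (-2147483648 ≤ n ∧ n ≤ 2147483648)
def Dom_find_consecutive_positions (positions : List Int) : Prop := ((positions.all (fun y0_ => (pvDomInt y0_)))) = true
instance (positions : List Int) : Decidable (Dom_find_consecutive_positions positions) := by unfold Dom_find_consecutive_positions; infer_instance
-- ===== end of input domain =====

-- B replaces A's block-building two-phase scan by a single pass that marks each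
-- position from its two neighbors (simpler decomposition, same cost).


-- ===== PORT A =====
def find_consecutive_positions (positions : List Int) : List Bool :=
  match positions with
  | [] => []       -- Python: 'pos[0]' raises IndexError here; excluded by Pre_
  | p0 :: _ =>
    -- for i in range(1, len(pos)): grow / close the current block
    let st := (PySem.List.pyRange 1 (positions.length : Int) 1).foldl
      (fun (st : List (List Int) × List Int) i =>
        if PySem.List.pyGetD positions i 0 - PySem.List.pyGetD positions (i - 1) 0 = 1 then
          (st.1, st.2 ++ [PySem.List.pyGetD positions i 0])
        else
          (st.1 ++ [st.2], [PySem.List.pyGetD positions i 0]))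
      (([] : List (List Int)), [p0])
    let consecutive_blocks := st.1 ++ [st.2]
    -- for block in consecutive_blocks: render it
    consecutive_blocks.foldl
      (fun acc block =>
        if block.length = 1 then acc ++ [true]
        else acc ++ block.map (fun _ => false))
      ([] : List Bool)

-- ===== PORT B =====
def find_consecutive_positions_alt (positions : List Int) : List Bool :=
  let n : Int := (positions.length : Int)
  (PySem.List.pyRange 0 n 1).map (fun i =>
    (decide (i = 0) || decide (PySem.List.pyGetD positions i 0 - PySem.List.pyGetD positions (i - 1) 0 ≠ 1))
    && (decide (i = n - 1) || decide (PySem.List.pyGetD positions (i + 1) 0 - PySem.List.pyGetD positions i 0 ≠ 1)))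

-- ===== PRECONDITION & SPEC =====
-- Pre_ excludes only the empty list, on which A raises IndexError (pos[0]).
def Pre_find_consecutive_positions (positions : List Int) : Prop := positions ≠ []
instance (positions : List Int) : Decidable (Pre_find_consecutive_positions positions) := by unfold Pre_find_consecutive_positions; infer_instance
def pvWitness_find_consecutive_positions : List Int := [1, 2, 4]

def Spec_find_consecutive_positions (positions : List Int) (out : List Bool) : Prop := out = find_consecutive_positions_alt positions
instance (positions : List Int) (out : List Bool) : Decidable (Spec_find_consecutive_positions positions out) := by unfold Spec_find_consecutive_positions; infer_instance

-- ===== CLAIM (what is proved, stated in full; the proofs are below) =====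
def Claim_equal_find_consecutive_positions : Prop := ∀ (positions : List Int), Dom_find_consecutive_positions positions → Pre_find_consecutive_positions positions → Spec_find_consecutive_positions positions (find_consecutive_positions positions)

-- ===== LEMMAS AND PROOFS =====

-- Structural mirror of A's first loop (blocks, current block, previous value).
def goA (blocks : List (List Int)) (cur : List Int) (prev : Int) : List Int → List (List Int) × List Int
  | [] => (blocks, cur)
  | x :: xs =>
    if x - prev = 1 then goA blocks (cur ++ [x]) x xs
    else goA (blocks ++ [cur]) [x] x xs

-- Rendering of one block (A's second loop, per block).
def render (block : List Int) : List Bool :=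
  if block.length = 1 then [true] else List.replicate block.length false

-- Output for the pending block of size cl ending at prev, plus the rest.
def hRest (cl : Nat) (prev : Int) : List Int → List Bool
  | [] => if cl = 1 then [true] else List.replicate cl false
  | x :: xs =>
    if x - prev = 1 then hRest (cl + 1) x xs
    else (if cl = 1 then [true] else List.replicate cl false) ++ hRest 1 x xs

-- Structural mirror of B for the non-first positions: prev is the predecessor.
def gB (prev : Int) : List Int → List Bool
  | [] => []
  | x :: xs =>
    (decide (x - prev ≠ 1) && (match xs with | [] => true | y :: _ => decide (y - x ≠ 1))) :: gB x xs

-- mark of a position whose block already holds cl elements, given the rest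
def mk (cl : Nat) (prev : Int) (rest : List Int) : Bool :=
  decide (cl = 1) && (match rest with | [] => true | y :: _ => decide (y - prev ≠ 1))

theorem getD_append_length (pre rest : List Int) (x : Int) :
    (pre ++ x :: rest).getD pre.length 0 = x := by
  simp [List.getD_eq_getElem?_getD]

theorem getD_append_pred (pre rest : List Int) (prev : Int) (h : pre.getLast? = some prev) :
    (pre ++ rest).getD (pre.length - 1) 0 = prev := by
  have hne : pre ≠ [] := by rintro rfl; simp at h
  have hlen : 0 < pre.length := List.length_pos_iff.mpr hne
  have h1 : pre.length - 1 < pre.length := by omega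
  rw [List.getD_eq_getElem?_getD, List.getElem?_append_left h1, List.getElem?_eq_getElem h1]
  rw [List.getLast?_eq_some_getLast hne] at h
  simp only [Option.some.injEq] at h
  simp [← h, List.getLast_eq_getElem]

theorem foldA_eq (ps : List Int) : ∀ (rest pre : List Int) (blocks : List (List Int))
    (cur : List Int) (prev : Int) (a : Int), ps = pre ++ rest → pre.getLast? = some prev →
    a = (pre.length : Int) →
    (PySem.List.pyRange a (ps.length : Int) 1).foldl
      (fun (st : List (List Int) × List Int) i =>
        if PySem.List.pyGetD ps i 0 - PySem.List.pyGetD ps (i - 1) 0 = 1 then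
          (st.1, st.2 ++ [PySem.List.pyGetD ps i 0])
        else
          (st.1 ++ [st.2], [PySem.List.pyGetD ps i 0]))
      (blocks, cur) = goA blocks cur prev rest := by
  intro rest
  induction rest with
  | nil =>
    intro pre blocks cur prev a hps _ ha
    subst hps; subst ha
    rw [PySem.List.pyRange_one_eq_nil (by simp)]
    rfl
  | cons x xs ih =>
    intro pre blocks cur prev a hps hlast ha
    subst ha
    have hne : pre ≠ [] := by rintro rfl; simp at hlast
    have hlt : (pre.length : Int) < (ps.length : Int) := by
      subst hps
      simp only [List.length_append, List.length_cons, Nat.cast_lt]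
      omega
    rw [PySem.List.pyRange_one_cons hlt]
    simp only [List.foldl_cons]
    have hx : PySem.List.pyGetD ps (pre.length : Int) 0 = x := by
      rw [PySem.List.pyGetD_natCast, hps, getD_append_length]
    have hprev : PySem.List.pyGetD ps ((pre.length : Int) - 1) 0 = prev := by
      have hlp : 0 < pre.length := List.length_pos_iff.mpr hne
      have : ((pre.length : Int) - 1) = ((pre.length - 1 : Nat) : Int) := by omega
      rw [this, PySem.List.pyGetD_natCast, hps, getD_append_pred _ _ _ hlast]
    rw [hx, hprev]
    have hrec : ∀ (b : List (List Int)) (c : List Int),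
        (PySem.List.pyRange ((pre.length : Int) + 1) (ps.length : Int) 1).foldl
          (fun (st : List (List Int) × List Int) i =>
            if PySem.List.pyGetD ps i 0 - PySem.List.pyGetD ps (i - 1) 0 = 1 then
              (st.1, st.2 ++ [PySem.List.pyGetD ps i 0])
            else
              (st.1 ++ [st.2], [PySem.List.pyGetD ps i 0]))
          (b, c) = goA b c x xs := by
      intro b c
      exact ih (pre ++ [x]) b c x _ (by simp [hps]) (by simp) (by simp)
    by_cases hadj : x - prev = 1
    · simpa [goA, hadj] using hrec blocks (cur ++ [x])
    · simpa [goA, hadj] using hrec (blocks ++ [cur]) [x]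

theorem foldl_render : ∀ (bs : List (List Int)) (acc : List Bool),
    bs.foldl (fun acc block =>
        if block.length = 1 then acc ++ [true]
        else acc ++ block.map (fun _ => false)) acc
      = acc ++ bs.flatMap render := by
  intro bs
  induction bs with
  | nil => simp
  | cons b bs ih =>
    intro acc
    simp only [List.foldl_cons, List.flatMap_cons, ih]
    by_cases hb : b.length = 1
    · simp [hb, render]
    · simp [hb, render, List.map_const']

theorem goA_flat : ∀ (rest : List Int) (blocks : List (List Int)) (cur : List Int) (prev : Int),
    ((goA blocks cur prev rest).1 ++ [(goA blocks cur prev rest).2]).flatMap render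
      = blocks.flatMap render ++ hRest cur.length prev rest := by
  intro rest
  induction rest with
  | nil =>
    intro blocks cur prev
    simp [goA, hRest, render]
  | cons x xs ih =>
    intro blocks cur prev
    by_cases hadj : x - prev = 1
    · simp only [goA, if_pos hadj, hRest, ih]
      simp
    · simp only [goA, if_neg hadj, hRest, ih]
      simp [render]

theorem rep_app (n : Nat) (h : 1 ≤ n) :
    List.replicate (n - 1) false ++ [false] = List.replicate n false := by
  rcases n with _ | n
  · omega
  · simp [List.replicate_succ']

theorem hRest_gB : ∀ (rest : List Int) (cl : Nat) (prev : Int), 1 ≤ cl →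
    hRest cl prev rest = List.replicate (cl - 1) false ++ mk cl prev rest :: gB prev rest := by
  intro rest
  induction rest with
  | nil =>
    intro cl prev hcl
    by_cases hc : cl = 1
    · subst hc; simp [hRest, mk, gB]
    · simp only [hRest, mk, gB, if_neg hc]
      rw [← rep_app cl hcl]
      simp [hc]
  | cons x xs ih =>
    intro cl prev hcl
    by_cases hadj : x - prev = 1
    · simp only [hRest, if_pos hadj]
      rw [ih (cl + 1) x (by omega)]
      have hm1 : mk (cl + 1) x xs = false := by
        have hne1 : ¬ (cl + 1 = 1) := by omega
        simp only [mk, decide_eq_false hne1, Bool.false_and]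
      have hm2 : mk cl prev (x :: xs) = false := by simp [mk, hadj]
      rw [hm1, hm2]
      show List.replicate cl false ++ _ = _
      have hg : gB prev (x :: xs) = false :: gB x xs := by simp [gB, hadj]
      rw [hg, ← rep_app cl hcl]
      simp
    · simp only [hRest, if_neg hadj]
      rw [ih 1 x (by omega)]
      have hgb : gB prev (x :: xs) = mk 1 x xs :: gB x xs := by
        simp [gB, mk, hadj]
      rw [hgb]
      have hm : mk cl prev (x :: xs) = decide (cl = 1) := by simp [mk, hadj]
      rw [hm]
      by_cases hc : cl = 1
      · subst hc; simp
      · rw [← rep_app cl hcl]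
        simp [hc]

theorem mapB_eq (ps : List Int) : ∀ (rest pre : List Int) (prev : Int) (a : Int),
    ps = pre ++ rest → pre.getLast? = some prev → a = (pre.length : Int) →
    (PySem.List.pyRange a (ps.length : Int) 1).map (fun i =>
      (decide (i = 0) || decide (PySem.List.pyGetD ps i 0 - PySem.List.pyGetD ps (i - 1) 0 ≠ 1))
      && (decide (i = (ps.length : Int) - 1) || decide (PySem.List.pyGetD ps (i + 1) 0 - PySem.List.pyGetD ps i 0 ≠ 1)))
      = gB prev rest := by
  intro rest
  induction rest with
  | nil =>
    intro pre prev a hps _ ha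
    subst hps; subst ha
    rw [PySem.List.pyRange_one_eq_nil (by simp)]
    rfl
  | cons x xs ih =>
    intro pre prev a hps hlast ha
    subst ha
    have hne : pre ≠ [] := by rintro rfl; simp at hlast
    have hlp : 0 < pre.length := List.length_pos_iff.mpr hne
    have hlen : ps.length = pre.length + 1 + xs.length := by subst hps; simp; omega
    have hlt : (pre.length : Int) < (ps.length : Int) := by omega
    rw [PySem.List.pyRange_one_cons hlt]
    simp only [List.map_cons]
    have hx : PySem.List.pyGetD ps (pre.length : Int) 0 = x := by
      rw [PySem.List.pyGetD_natCast, hps, getD_append_length]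
    have hprev : PySem.List.pyGetD ps ((pre.length : Int) - 1) 0 = prev := by
      have : ((pre.length : Int) - 1) = ((pre.length - 1 : Nat) : Int) := by omega
      rw [this, PySem.List.pyGetD_natCast, hps, getD_append_pred _ _ _ hlast]
    have hzero : decide ((pre.length : Int) = 0) = false := by
      simp; omega
    have htail :
        (PySem.List.pyRange ((pre.length : Int) + 1) (ps.length : Int) 1).map (fun i =>
          (decide (i = 0) || decide (PySem.List.pyGetD ps i 0 - PySem.List.pyGetD ps (i - 1) 0 ≠ 1))
          && (decide (i = (ps.length : Int) - 1) || decide (PySem.List.pyGetD ps (i + 1) 0 - PySem.List.pyGetD ps i 0 ≠ 1)))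
          = gB x xs := by
      exact ih (pre ++ [x]) x _ (by simp [hps]) (by simp) (by simp)
    rw [htail, hx, hprev, hzero]
    cases xs with
    | nil =>
      simp only [List.length_nil] at hlen
      have heq : decide ((pre.length : Int) = (ps.length : Int) - 1) = true := by
        simp only [decide_eq_true_eq]; omega
      rw [heq]
      simp [gB]
    | cons y ys =>
      simp only [List.length_cons] at hlen
      have h0 : decide ((pre.length : Int) = (ps.length : Int) - 1) = false := by
        simp only [decide_eq_false_iff_not]; omega
      have hy : PySem.List.pyGetD ps ((pre.length : Int) + 1) 0 = y := by
        have h1 : ((pre.length : Int) + 1) = (((pre ++ [x]).length : Nat) : Int) := by simp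
        have h2 : ps = (pre ++ [x]) ++ y :: ys := by simp [hps]
        rw [h1, PySem.List.pyGetD_natCast, h2, getD_append_length]
      rw [h0, hy]
      simp [gB]

theorem A_eq_hRest (p0 : Int) (rest : List Int) :
    find_consecutive_positions (p0 :: rest) = hRest 1 p0 rest := by
  simp only [find_consecutive_positions]
  rw [foldA_eq (p0 :: rest) rest [p0] [] [p0] p0 1 (by simp) (by simp) (by simp)]
  rw [foldl_render]
  simpa using goA_flat rest [] [p0] p0

theorem B_eq_gB (p0 : Int) (rest : List Int) :
    find_consecutive_positions_alt (p0 :: rest) = mk 1 p0 rest :: gB p0 rest := by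
  unfold find_consecutive_positions_alt
  simp only
  rw [PySem.List.pyRange_one_cons (by exact_mod_cast Nat.succ_pos rest.length)]
  simp only [List.map_cons, zero_add]
  rw [mapB_eq (p0 :: rest) rest [p0] p0 1 (by simp) (by simp) (by simp)]
  congr 1
  have hget0 : PySem.List.pyGetD (p0 :: rest) 0 0 = p0 := PySem.List.pyGetD_zero_cons p0 rest 0
  rw [hget0]
  simp only [decide_true, Bool.true_or, Bool.true_and]
  cases rest with
  | nil => simp [mk]
  | cons y ys =>
    have h0 : decide ((0 : Int) = (((p0 :: y :: ys).length : Nat) : Int) - 1) = false := by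
      simp only [decide_eq_false_iff_not, List.length_cons]
      push_cast
      omega
    have hy : PySem.List.pyGetD (p0 :: y :: ys) (1 : Int) 0 = y := by
      have h1 : (1 : Int) = ((1 : Nat) : Int) := rfl
      rw [h1, PySem.List.pyGetD_natCast]
      rfl
    rw [h0, hy]
    simp [mk]

-- ===== VERDICT (by name: the statement is the Claim_ definition above) =====
theorem find_consecutive_positions_spec : Claim_equal_find_consecutive_positions := by
  intro positions _ hpre
  unfold Spec_find_consecutive_positions
  cases positions with
  | nil => exact absurd rfl hpre
  | cons p0 rest =>
    rw [A_eq_hRest, B_eq_gB, hRest_gB rest 1 p0 (le_refl 1)]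
    simp
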